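-- pv_equiv track=rewrite | github.com/maxwshen/indelphi-dataprocessinganalysis | src_modeling_and_analysis/_predict.py | find_microhomologies
-- ===== SOURCE A (Python) =====
-- def find_microhomologies(left, right):
--     start_idx = max(len(right) - len(left), 0)
--     mhs = []
--     mh = [start_idx]
--     for idx in range(min(len(right), len(left))):
--         if left[idx] == right[start_idx + idx]:
--             mh.append(start_idx + idx + 1)
--         else:
--             mhs.append(mh)
--             mh = [start_idx + idx + 1]
--     mhs.append(mh)
--     return mhs
-- ===== SOURCE B (Python) =====
-- def find_microhomologies(left, right):
--     start_idx = max(len(right) - len(left), 0)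
--     n = min(len(right), len(left))
--     positions = [start_idx + j for j in range(n + 1)]
--     cuts = [0] + [idx + 1 for idx in range(n) if left[idx] != right[start_idx + idx]] + [n + 1]
--     return [positions[cuts[i]:cuts[i + 1]] for i in range(len(cuts) - 1)]
-- ===== Notes on version B (the rewrite author's own statement) =====
-- stated objective: alternative
-- what changed: A builds the groups incrementally in one stateful loop (append to the current group, flush on mismatch); B instead classifies first (collects the list of cut indices where the strings mismatch) and then partitions the full position list by slicing between consecutive cuts.
import Mathlib
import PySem

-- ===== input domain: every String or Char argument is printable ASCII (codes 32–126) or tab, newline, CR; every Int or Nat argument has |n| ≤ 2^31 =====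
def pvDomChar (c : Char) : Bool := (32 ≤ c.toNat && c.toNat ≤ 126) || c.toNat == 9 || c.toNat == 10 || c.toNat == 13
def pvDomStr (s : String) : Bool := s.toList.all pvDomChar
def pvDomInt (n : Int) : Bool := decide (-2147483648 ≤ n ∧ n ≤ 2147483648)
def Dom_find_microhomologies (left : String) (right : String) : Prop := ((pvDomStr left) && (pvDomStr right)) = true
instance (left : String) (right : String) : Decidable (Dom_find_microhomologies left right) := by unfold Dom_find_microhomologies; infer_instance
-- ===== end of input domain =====

-- B replaces A's incremental append-and-flush grouping by a classify-then-partition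
-- decomposition (collect the mismatch cut indices, then slice the full position list);
-- objective: alternative structure, same O(n) cost.


-- ===== PORT A =====
-- literal transliteration of A: state (mhs, mh), flush on mismatch, final append
def find_microhomologies (left : String) (right : String) : List (List Int) :=
  let L := left.toList
  let R := right.toList
  let start_idx : Int := max ((R.length : Int) - (L.length : Int)) 0
  let q := (PySem.List.pyRange 0 (min (R.length : Int) (L.length : Int)) 1).foldl
    (fun (st : List (List Int) × List Int) idx =>
      if PySem.List.pyGet? L idx = PySem.List.pyGet? R (start_idx + idx) then
        (st.1, st.2 ++ [start_idx + idx + 1])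
      else
        (st.1 ++ [st.2], [start_idx + idx + 1]))
    ([], [start_idx])
  q.1 ++ [q.2]

-- ===== PORT B =====
-- literal transliteration of B: position list, cut indices (0, mismatch idx + 1, n + 1), then slices
def find_microhomologies_alt (left : String) (right : String) : List (List Int) :=
  let L := left.toList
  let R := right.toList
  let start_idx : Int := max ((R.length : Int) - (L.length : Int)) 0
  let n : Int := min ((R.length : Int)) ((L.length : Int))
  let positions : List Int := (PySem.List.pyRange 0 (n + 1) 1).map (fun j => start_idx + j)
  let cuts : List Int := [0] ++ ((PySem.List.pyRange 0 n 1).filter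
      (fun idx => decide (PySem.List.pyGet? L idx ≠ PySem.List.pyGet? R (start_idx + idx)))).map (fun idx => idx + 1) ++ [n + 1]
  (PySem.List.pyRange 0 ((cuts.length : Int) - 1) 1).map (fun i =>
    PySem.List.slice positions (some (PySem.List.pyGetD cuts i 0)) (some (PySem.List.pyGetD cuts (i + 1) 0)))

-- ===== PRECONDITION & SPEC =====
def Spec_find_microhomologies (left : String) (right : String) (out : List (List Int)) : Prop := out = find_microhomologies_alt left right
instance (left : String) (right : String) (out : List (List Int)) : Decidable (Spec_find_microhomologies left right out) := by unfold Spec_find_microhomologies; infer_instance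

-- ===== CLAIM (what is proved, stated in full; the proofs are below) =====
def Claim_equal_find_microhomologies : Prop := ∀ (left : String) (right : String), Dom_find_microhomologies left right → Spec_find_microhomologies left right (find_microhomologies left right)

-- ===== LEMMAS AND PROOFS =====

-- B's partition step, restated over Nat cut indices
def pvSliceMap (xs : List Int) (cuts : List Nat) : List (List Int) :=
  (List.range (cuts.length - 1)).map (fun i =>
    ((xs.drop (cuts.getD i 0)).take (cuts.getD (i + 1) 0 - cuts.getD i 0)))

-- cut a list at the given absolute cut indices
def pvChop (xs : List Int) : List Nat → List (List Int)
  | [] => [xs]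
  | c :: cs => xs.take c :: pvChop (xs.drop c) (cs.map (· - c))
termination_by cs => cs.length
decreasing_by simp

-- prepend `cur` onto the first group
def pvPf (cur : List Int) : List (List Int) → List (List Int)
  | [] => [cur]
  | g :: gs => (cur ++ g) :: gs

-- recursive grouping: at head position p, a `true` extends the current group, a `false` flushes it
def pvF : Int → List Bool → List Int → List (List Int)
  | _, [], cur => [cur]
  | p, b :: bs, cur => if b then pvF (p + 1) bs (cur ++ [p]) else cur :: pvF (p + 1) bs [p]

-- cut indices of a boolean match list: loop index of each `false`
def pvCuts : List Bool → List Nat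
  | [] => []
  | b :: bs => (if b then ([] : List Nat) else [0]) ++ (pvCuts bs).map (· + 1)

theorem pvSliceMap_cons (xs : List Int) (c : Nat) (rest : List Nat)
    (h : ∀ x ∈ rest, c ≤ x) :
    pvSliceMap xs (0 :: c :: rest) = xs.take c :: pvSliceMap (xs.drop c) (0 :: rest.map (· - c)) := by
  unfold pvSliceMap
  simp only [List.length_cons, List.length_map, Nat.add_sub_cancel]
  rw [List.range_succ_eq_map]
  simp only [List.map_cons, List.map_map]
  refine List.cons_eq_cons.mpr ⟨by simp, List.map_congr_left ?_⟩
  intro a ha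
  have ha' : a < rest.length := List.mem_range.mp ha
  obtain ⟨v, hv⟩ : ∃ v, rest[a]? = some v := ⟨rest[a], List.getElem?_eq_getElem ha'⟩
  simp only [Function.comp_apply, Nat.succ_eq_add_one, List.getD_eq_getElem?_getD]
  cases a with
  | zero => simp [hv]
  | succ j =>
    have hj : j < rest.length := by omega
    obtain ⟨w, hw⟩ : ∃ w, rest[j]? = some w := ⟨rest[j], List.getElem?_eq_getElem hj⟩
    have hcw : c ≤ w := h w (List.mem_of_getElem? hw)
    simp only [List.getElem?_cons_succ, List.getElem?_map, hv, hw, Option.map_some,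
      Option.getD_some, List.drop_drop]
    have e1 : c + (w - c) = w := by omega
    rw [e1]
    congr 1
    omega

theorem pvSliceMap_eq_pvChop_aux (n : Nat) : ∀ (cs : List Nat) (xs : List Int),
    cs.length = n → (cs ++ [xs.length]).Pairwise (· ≤ ·) →
    pvSliceMap xs (0 :: cs ++ [xs.length]) = pvChop xs cs := by
  induction n with
  | zero =>
    intro cs xs hn _
    rw [List.length_eq_zero_iff.mp hn]
    simp [pvSliceMap, pvChop, List.range_succ]
  | succ m ih =>
    intro cs xs hn h
    obtain ⟨c, cs', rfl⟩ : ∃ c cs', cs = c :: cs' := by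
      cases cs with
      | nil => simp at hn
      | cons a b => exact ⟨a, b, rfl⟩
    have hmem : ∀ x ∈ cs' ++ [xs.length], c ≤ x := (List.pairwise_cons.mp h).1
    have hrec := pvSliceMap_cons xs c (cs' ++ [xs.length]) hmem
    have heq : ((0 : Nat) :: (c :: cs') ++ [xs.length]) = (0 :: c :: (cs' ++ [xs.length])) := by simp
    rw [heq, hrec]
    have hlen : (xs.drop c).length = xs.length - c := by simp
    have hmap : (cs' ++ [xs.length]).map (· - c) = cs'.map (· - c) ++ [(xs.drop c).length] := by
      simp [hlen]
    rw [hmap]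
    have hpair : (cs'.map (· - c) ++ [(xs.drop c).length]).Pairwise (· ≤ ·) := by
      rw [← hmap]
      exact ((List.pairwise_cons.mp h).2).map _ (fun a b hab => by omega)
    rw [pvChop]
    congr 1
    have := ih (cs'.map (· - c)) (xs.drop c) (by simp at hn ⊢; omega) hpair
    simpa [List.cons_append] using this

theorem pvSliceMap_eq_pvChop (cs : List Nat) (xs : List Int)
    (h : (cs ++ [xs.length]).Pairwise (· ≤ ·)) :
    pvSliceMap xs (0 :: cs ++ [xs.length]) = pvChop xs cs :=
  pvSliceMap_eq_pvChop_aux cs.length cs xs rfl h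

theorem pvChop_ne_nil (xs : List Int) (cs : List Nat) : pvChop xs cs ≠ [] := by
  cases cs <;> simp [pvChop]

theorem pvPf_pvPf (cur : List Int) (x : Int) (X : List (List Int)) (h : X ≠ []) :
    pvPf cur (pvPf [x] X) = pvPf (cur ++ [x]) X := by
  cases X with
  | nil => exact absurd rfl h
  | cons g gs => simp [pvPf]

theorem pvChop_shift (x : Int) (xs : List Int) (cs : List Nat) :
    pvChop (x :: xs) (cs.map (· + 1)) = pvPf [x] (pvChop xs cs) := by
  cases cs with
  | nil => simp [pvChop, pvPf]
  | cons c cs' =>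
    have hm : (cs'.map (· + 1)).map (· - (c + 1)) = cs'.map (· - c) := by
      rw [List.map_map]; exact List.map_congr_left (fun a _ => by simp only [Function.comp_apply]; omega)
    simp [pvChop, pvPf, hm]

theorem pvPos_cons (p : Int) (n : Nat) :
    (List.range (n + 1)).map (fun (j : Nat) => p + (j : Int)) = p :: (List.range n).map (fun (j : Nat) => (p + 1) + (j : Int)) := by
  rw [List.range_succ_eq_map, List.map_cons, List.map_map]
  refine List.cons_eq_cons.mpr ⟨by simp, List.map_congr_left (fun a _ => ?_)⟩
  simp only [Function.comp_apply, Nat.succ_eq_add_one]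
  push_cast; ring

theorem pvF_eq_pf_chop (bs : List Bool) : ∀ (p : Int) (cur : List Int),
    pvF p bs cur = pvPf cur (pvChop ((List.range bs.length).map (fun (j : Nat) => p + (j : Int))) (pvCuts bs)) := by
  induction bs with
  | nil => intro p cur; simp [pvF, pvCuts, pvChop, pvPf]
  | cons b bs ih =>
    intro p cur
    rw [List.length_cons, pvPos_cons]
    cases b with
    | true =>
      simp only [pvF, if_true, pvCuts, List.nil_append]
      rw [pvChop_shift, pvPf_pvPf _ _ _ (pvChop_ne_nil _ _), ih]
    | false =>
      simp only [pvF, pvCuts]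
      have : ((0 : Nat) :: (pvCuts bs).map (· + 1)) = [0] ++ (pvCuts bs).map (· + 1) := rfl
      rw [show ((if false then ([] : List Nat) else [0]) ++ (pvCuts bs).map (· + 1)) = (0 :: (pvCuts bs).map (· + 1)) by simp]
      rw [pvChop]
      simp only [List.take_zero, List.drop_zero]
      rw [show ((pvCuts bs).map (· + 1)).map (· - 0) = (pvCuts bs).map (· + 1) by simp]
      rw [pvChop_shift, ih]
      rcases hX : pvChop ((List.range bs.length).map (fun (j : Nat) => (p + 1) + (j : Int))) (pvCuts bs) with _ | ⟨g, gs⟩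
      · exact absurd hX (pvChop_ne_nil _ _)
      · rw [ih, hX]; simp [pvPf]

theorem pvCuts_eq_filter (bs : List Bool) :
    pvCuts bs = (List.range bs.length).filter (fun i => !(bs.getD i true)) := by
  induction bs with
  | nil => simp [pvCuts]
  | cons b bs ih =>
    rw [List.length_cons, List.range_succ_eq_map, List.filter_cons, List.filter_map]
    have hcomp : ((fun i => !((b :: bs).getD i true)) ∘ Nat.succ) = (fun i => !(bs.getD i true)) := by
      funext i; simp
    rw [hcomp, ← ih]
    cases b <;> simp [pvCuts]

theorem pvCond_cons (cond : Int → Bool) (a : Int) (k : Nat) :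
    (List.range (k + 1)).map (fun (j : Nat) => cond (a + (j : Int)))
      = cond a :: (List.range k).map (fun (j : Nat) => cond ((a + 1) + (j : Int))) := by
  rw [List.range_succ_eq_map, List.map_cons, List.map_map]
  refine List.cons_eq_cons.mpr ⟨by simp, List.map_congr_left (fun x _ => ?_)⟩
  simp only [Function.comp_apply, Nat.succ_eq_add_one]
  congr 1; push_cast; ring

theorem pvFoldA (cond : Int → Bool) (s : Int) (k : Nat) :
    ∀ (a : Int) (acc : List (List Int)) (cur : List Int),
    (let q := (PySem.List.pyRange a (a + (k : Int)) 1).foldl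
        (fun (st : List (List Int) × List Int) idx =>
          if cond idx then (st.1, st.2 ++ [s + idx + 1]) else (st.1 ++ [st.2], [s + idx + 1]))
        (acc, cur);
      q.1 ++ [q.2])
    = acc ++ pvF (s + a + 1) ((List.range k).map (fun (j : Nat) => cond (a + (j : Int)))) cur := by
  induction k with
  | zero =>
    intro a acc cur
    rw [show a + ((0 : Nat) : Int) = a by simp, PySem.List.pyRange_one_eq_nil (le_refl a)]
    simp [pvF]
  | succ m ih =>
    intro a acc cur
    have hlt : a < a + ((m + 1 : Nat) : Int) := by push_cast; omega
    rw [PySem.List.pyRange_one_cons hlt, pvCond_cons]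
    simp only [List.foldl_cons]
    have hend : a + ((m + 1 : Nat) : Int) = (a + 1) + ((m : Nat) : Int) := by push_cast; ring
    rw [hend]
    cases hc : cond a with
    | true =>
      rw [if_pos rfl, ih (a + 1) acc (cur ++ [s + a + 1])]
      simp only [pvF, if_true]
      have : s + (a + 1) + 1 = s + a + 1 + 1 := by ring
      rw [this]
    | false =>
      rw [if_neg (by simp), ih (a + 1) (acc ++ [cur]) [s + a + 1]]
      simp only [pvF]
      have : s + (a + 1) + 1 = s + a + 1 + 1 := by ring
      rw [this, List.append_assoc]
      simp

theorem pv_main (left right : String) :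
    find_microhomologies left right = find_microhomologies_alt left right := by
  unfold find_microhomologies find_microhomologies_alt
  dsimp only
  set L := left.toList with hL
  set R := right.toList with hRd
  set s : Int := max ((R.length : Int) - (L.length : Int)) 0 with hs
  have hmin : min ((R.length : Int)) ((L.length : Int)) = ((min R.length L.length : Nat) : Int) := by
    simp
  rw [hmin]
  set n : Nat := min R.length L.length with hn
  set cond : Int → Bool := fun idx => decide (PySem.List.pyGet? L idx = PySem.List.pyGet? R (s + idx)) with hcond
  set bs : List Bool := (List.range n).map (fun (j : Nat) => cond (j : Int)) with hbs
  have hstep : (fun (st : List (List Int) × List Int) idx =>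
      if PySem.List.pyGet? L idx = PySem.List.pyGet? R (s + idx) then (st.1, st.2 ++ [s + idx + 1])
      else (st.1 ++ [st.2], [s + idx + 1]))
    = (fun (st : List (List Int) × List Int) idx =>
      if cond idx = true then (st.1, st.2 ++ [s + idx + 1]) else (st.1 ++ [st.2], [s + idx + 1])) := by
    funext st idx
    by_cases h : PySem.List.pyGet? L idx = PySem.List.pyGet? R (s + idx) <;> simp [hcond, h]
  have hA := pvFoldA cond s n 0 [] [s]
  dsimp only at hA
  simp only [zero_add, add_zero, List.nil_append] at hA
  rw [← hbs] at hA
  rw [hstep, hA]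
  -- B side
  set csN : List Nat := (pvCuts bs).map (· + 1) with hcs
  set natcuts : List Nat := 0 :: csN ++ [n + 1] with hnatcuts
  have hfiltc : (List.range n).filter ((fun idx => decide (PySem.List.pyGet? L idx ≠ PySem.List.pyGet? R (s + idx))) ∘ (fun (k : Nat) => (k : Int))) = pvCuts bs := by
    rw [pvCuts_eq_filter]
    have hlbs : bs.length = n := by simp [hbs]
    rw [hlbs]
    apply List.filter_congr
    intro i hi
    have hi' : i < n := List.mem_range.mp hi
    have : bs.getD i true = cond (i : Int) := by
      simp [hbs, List.getD_eq_getElem?_getD, List.getElem?_map, List.getElem?_range hi']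
    simp only [Function.comp_apply, this, hcond]
    by_cases h : PySem.List.pyGet? L (i : Int) = PySem.List.pyGet? R (s + (i : Int)) <;> simp [h]
  have hcuts : ([(0:Int)] ++ (((PySem.List.pyRange 0 (n : Int) 1).filter
      (fun idx => decide (PySem.List.pyGet? L idx ≠ PySem.List.pyGet? R (s + idx)))).map (fun idx => idx + 1)) ++ [(n : Int) + 1])
      = natcuts.map (fun (c : Nat) => (c : Int)) := by
    rw [PySem.List.pyRange_zero_nat, List.filter_map, hfiltc, hnatcuts, hcs]
    simp [List.map_map, Function.comp_def, Nat.cast_add, Nat.cast_one]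
  rw [hcuts]
  have hblen : (((natcuts.map (fun (c : Nat) => (c : Int))).length : Int) - 1) = ((csN.length + 1 : Nat) : Int) := by
    simp [hnatcuts]
  rw [hblen, PySem.List.pyRange_zero_nat, List.map_map]
  have hpos : (PySem.List.pyRange 0 ((n : Int) + 1) 1).map (fun j => s + j)
      = (List.range (n + 1)).map (fun (j : Nat) => s + (j : Int)) := by
    rw [show ((n : Int) + 1) = ((n + 1 : Nat) : Int) by push_cast; ring, PySem.List.pyRange_zero_nat,
      List.map_map]
    simp [Function.comp_def]
  rw [hpos]
  have hgd : ∀ (i : Nat), PySem.List.pyGetD (natcuts.map (fun (c : Nat) => (c : Int))) ((i : Nat) : Int) 0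
      = ((natcuts.getD i 0 : Nat) : Int) := by
    intro i
    rw [PySem.List.pyGetD_natCast]
    simp only [List.getD_eq_getElem?_getD, List.getElem?_map]
    rcases natcuts[i]? with _ | v <;> simp
  have hright : (List.range (csN.length + 1)).map
        ((fun i => PySem.List.slice ((List.range (n + 1)).map (fun (j : Nat) => s + (j : Int)))
            (some (PySem.List.pyGetD (natcuts.map (fun (c : Nat) => (c : Int))) i 0))
            (some (PySem.List.pyGetD (natcuts.map (fun (c : Nat) => (c : Int))) (i + 1) 0))) ∘ (fun (k : Nat) => (k : Int)))
      = pvSliceMap ((List.range (n + 1)).map (fun (j : Nat) => s + (j : Int))) natcuts := by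
    unfold pvSliceMap
    have hl2 : natcuts.length - 1 = csN.length + 1 := by simp [hnatcuts]
    rw [hl2]
    apply List.map_congr_left
    intro i _
    simp only [Function.comp_apply]
    rw [hgd i, show (((i : Nat) : Int) + 1) = ((i + 1 : Nat) : Int) by push_cast; ring, hgd (i + 1),
      PySem.List.slice_natCast]
  rw [hright]
  have h1 : (pvCuts bs).Pairwise (· < ·) := by
    rw [pvCuts_eq_filter]
    exact List.Pairwise.sublist List.filter_sublist List.pairwise_lt_range
  have h2 : csN.Pairwise (· < ·) := by
    rw [hcs]; exact h1.map _ (fun a b h => by omega)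
  have h3 : ∀ x ∈ csN, x ≤ n + 1 := by
    intro x hx
    rw [hcs] at hx
    obtain ⟨y, hy, rfl⟩ := List.mem_map.mp hx
    rw [pvCuts_eq_filter] at hy
    have := List.mem_range.mp (List.mem_of_mem_filter hy)
    have hlbs : bs.length = n := by simp [hbs]
    omega
  have hpw : (csN ++ [n + 1]).Pairwise (· ≤ ·) := by
    rw [List.pairwise_append]
    exact ⟨h2.imp le_of_lt, List.pairwise_singleton _ _,
      by intro x hx y hy; simp only [List.mem_singleton] at hy; subst hy; exact h3 x hx⟩
  have hlenpos : ((List.range (n + 1)).map (fun (j : Nat) => s + (j : Int))).length = n + 1 := by simp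
  have hchop := pvSliceMap_eq_pvChop csN ((List.range (n + 1)).map (fun (j : Nat) => s + (j : Int))) (by rw [hlenpos]; exact hpw)
  rw [hlenpos] at hchop
  rw [hnatcuts, hchop]
  rw [pvF_eq_pf_chop]
  have hlbs : bs.length = n := by simp [hbs]
  rw [hlbs, pvPos_cons, hcs, pvChop_shift]

-- ===== VERDICT (by name: the statement is the Claim_ definition above) =====
theorem find_microhomologies_spec : Claim_equal_find_microhomologies := by
  intro left right _
  unfold Spec_find_microhomologies
  exact pv_main left right
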